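-- pv_equiv track=rewrite | github.com/yhli1016/misc | physics/tbmod/symtb.py | check_conj
-- ===== SOURCE A (Python) =====
-- from typing import Tuple, Union, List
--
-- def check_conj(hop_ind: Tuple[int, ...], i: int = 0) -> bool:
--     """
--     Check whether to take the conjugate part of the hopping term.
--
--     :param hop_ind: (r_a, r_b, r_c, orb_i, orb_j), hopping index
--     :param i: component index
--     :return: whether to take conjugate
--     """
--     if hop_ind[i] > 0:
--         return False
--     elif hop_ind[i] < 0:
--         return True
--     else:
--         if i < 2:
--             return check_conj(hop_ind, i+1)
--         else:
--             return hop_ind[3] > hop_ind[4]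
-- ===== SOURCE B (Python) =====
-- def check_conj(hop_ind, i=0):
--     """Iterative re-implementation: scan components i..2 for the first
--     nonzero sign, then fall back to the orbital-index tie-break."""
--     for j in range(i, 3):
--         if hop_ind[j] > 0:
--             return False
--         if hop_ind[j] < 0:
--             return True
--     return hop_ind[3] > hop_ind[4]
-- ===== Notes on version B (the rewrite author's own statement) =====
-- stated objective: simpler
-- what changed: Replaced the self-recursive first-nonzero-sign search with a single explicit loop over components i..2 followed by the orbital tie-break.
-- outside the precondition, e.g. on check_conj((0, 0, 0, 1, 0), 3): A returns False, B returns True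
import Mathlib
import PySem

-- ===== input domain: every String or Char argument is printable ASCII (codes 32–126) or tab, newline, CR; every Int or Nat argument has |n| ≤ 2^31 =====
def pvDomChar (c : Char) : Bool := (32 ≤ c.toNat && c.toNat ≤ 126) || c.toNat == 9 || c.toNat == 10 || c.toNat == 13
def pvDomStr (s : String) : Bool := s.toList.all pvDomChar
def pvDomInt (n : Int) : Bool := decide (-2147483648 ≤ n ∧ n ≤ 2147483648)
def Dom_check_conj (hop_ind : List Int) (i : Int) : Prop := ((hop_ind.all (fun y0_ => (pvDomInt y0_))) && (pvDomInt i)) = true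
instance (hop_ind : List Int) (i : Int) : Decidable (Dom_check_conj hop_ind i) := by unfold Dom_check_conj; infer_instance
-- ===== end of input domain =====

-- B replaces A's self-recursion with one explicit loop over components i..2; objective: simpler.


-- ===== PORT A =====
-- recursion on i; `none` from pyGet? corresponds to a Python IndexError (excluded by Pre_)
def check_conj (hop_ind : List Int) (i : Int) : Bool :=
  match PySem.List.pyGet? hop_ind i with
  | none => false
  | some v =>
    if v > 0 then false
    else if v < 0 then true
    else if i < 2 then check_conj hop_ind (i + 1)
    else
      match PySem.List.pyGet? hop_ind 3, PySem.List.pyGet? hop_ind 4 with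
      | some a, some b => decide (a > b)
      | _, _ => false
termination_by (3 - i).toNat
decreasing_by omega

-- ===== PORT B =====
-- the body of Source B's `for j in range(i, 3)` loop, consumed index by index
def altScanLoop (hop_ind : List Int) : List Int → Bool
  | [] =>
    -- `return hop_ind[3] > hop_ind[4]`; a missing index (IndexError) is outside Pre_
    ((PySem.List.pyGet? hop_ind 3).bind fun a =>
      (PySem.List.pyGet? hop_ind 4).map fun b => decide (a > b)).getD false
  | j :: rest =>
    (PySem.List.pyGet? hop_ind j).elim false fun v =>
      if v > 0 then false
      else if v < 0 then true
      else altScanLoop hop_ind rest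

def check_conj_alt (hop_ind : List Int) (i : Int) : Bool :=
  altScanLoop hop_ind (PySem.List.pyRange i 3 1)

-- ===== PRECONDITION & SPEC =====
-- Pre_ is exactly A's return domain for a start component i ≤ 2: the start index is valid and
-- either the tuple is a full one (length ≥ 5, so the scan and the orbital tie-break never raise)
-- or some component in [i,3) is nonzero at a valid index with only zeros before it (the scan
-- returns before reading past the end).  It excludes i ≥ 3, where A's direct read of hop_ind[i]
-- (an orbital index taken as a lattice sign) is an accident of the recursion's base case.
def Pre_check_conj (hop_ind : List Int) (i : Int) : Prop :=
  i ≤ 2 ∧ -(hop_ind.length : Int) ≤ i ∧ i < hop_ind.length ∧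
  (5 ≤ hop_ind.length ∨
    ∃ j ∈ PySem.List.pyRange i 3 1,
      (PySem.List.pyGet? hop_ind j).getD 0 ≠ 0 ∧
      ∀ k ∈ PySem.List.pyRange i j 1, (PySem.List.pyGet? hop_ind k).getD 0 = 0)
instance (hop_ind : List Int) (i : Int) : Decidable (Pre_check_conj hop_ind i) := by
  unfold Pre_check_conj; infer_instance

def pvWitness_check_conj : List Int × Int := ([0, -1, 0, 2, 1], 0)

def Spec_check_conj (hop_ind : List Int) (i : Int) (out : Bool) : Prop := out = check_conj_alt hop_ind i
instance (hop_ind : List Int) (i : Int) (out : Bool) : Decidable (Spec_check_conj hop_ind i out) := by unfold Spec_check_conj; infer_instance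

-- ===== CLAIM (what is proved, stated in full; the proofs are below) =====
def Claim_equal_check_conj : Prop := ∀ (hop_ind : List Int) (i : Int), Dom_check_conj hop_ind i → Pre_check_conj hop_ind i → Spec_check_conj hop_ind i (check_conj hop_ind i)

-- ===== LEMMAS AND PROOFS =====

theorem pyGet?_isSome_of_bounds (hop : List Int) (j : Int)
    (h1 : -(hop.length : Int) ≤ j) (h2 : j < (hop.length : Int)) :
    ∃ v, PySem.List.pyGet? hop j = some v := by
  cases h : PySem.List.pyGet? hop j with
  | none =>
    rw [PySem.List.pyGet?_eq_none_iff] at h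
    exact absurd ⟨h1, h2⟩ h
  | some v => exact ⟨v, rfl⟩

theorem scan_eq (hop : List Int) (n : ℕ) :
    ∀ i : Int, (3 - i).toNat = n → i ≤ 2 → -(hop.length : Int) ≤ i → i < hop.length →
      (5 ≤ hop.length ∨
        ∃ j ∈ PySem.List.pyRange i 3 1,
          (PySem.List.pyGet? hop j).getD 0 ≠ 0 ∧
          ∀ k ∈ PySem.List.pyRange i j 1, (PySem.List.pyGet? hop k).getD 0 = 0) →
      check_conj hop i = altScanLoop hop (PySem.List.pyRange i 3 1) := by
  induction n using Nat.strong_induction_on with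
  | _ n ih =>
    intro i hn hhi hlo hup hdis
    have hi3 : i < 3 := by omega
    obtain ⟨v, hv⟩ := pyGet?_isSome_of_bounds hop i hlo (by exact_mod_cast hup)
    rw [PySem.List.pyRange_one_cons hi3, check_conj]
    simp only [altScanLoop, hv, Option.elim]
    by_cases h1 : v > 0
    · simp [h1]
    · by_cases h2 : v < 0
      · simp [h1, h2]
      · have hv0 : v = 0 := by omega
        -- the scan continues: the j of the disjunction (if any) lies strictly beyond i
        have hstep : ∀ j, j ∈ PySem.List.pyRange i 3 1 →
            (PySem.List.pyGet? hop j).getD 0 ≠ 0 →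
            (∀ k ∈ PySem.List.pyRange i j 1, (PySem.List.pyGet? hop k).getD 0 = 0) →
            i + 1 ≤ j ∧ j < (hop.length : Int) := by
          intro j hjmem hjval _hk
          have hjb := (PySem.List.mem_pyRange_one).1 hjmem
          have hjsome : PySem.List.pyGet? hop j ≠ none := by
            intro hnone; rw [hnone] at hjval; simp at hjval
          rw [Ne, PySem.List.pyGet?_eq_none_iff, not_not] at hjsome
          simp only [PySem.Raise.InRange] at hjsome
          have hji : j ≠ i := by
            intro h; rw [h, hv] at hjval; simp [hv0] at hjval
          exact ⟨by omega, by omega⟩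
        by_cases h3 : i < 2
        · simp only [h1, h2, h3, if_false, if_true]
          -- push the disjunction one index forward for the inductive hypothesis
          have hdis' : 5 ≤ hop.length ∨
              ∃ j ∈ PySem.List.pyRange (i + 1) 3 1,
                (PySem.List.pyGet? hop j).getD 0 ≠ 0 ∧
                ∀ k ∈ PySem.List.pyRange (i + 1) j 1, (PySem.List.pyGet? hop k).getD 0 = 0 := by
            rcases hdis with h5 | ⟨j, hjmem, hjval, hk⟩
            · exact Or.inl h5
            · refine Or.inr ⟨j, ?_, hjval, ?_⟩
              · have hjb := (PySem.List.mem_pyRange_one).1 hjmem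
                have := hstep j hjmem hjval hk
                exact (PySem.List.mem_pyRange_one).2 ⟨by omega, by omega⟩
              · intro k hkmem
                have hkb := (PySem.List.mem_pyRange_one).1 hkmem
                exact hk k ((PySem.List.mem_pyRange_one).2 ⟨by omega, by omega⟩)
          have hup' : i + 1 < (hop.length : Int) := by
            rcases hdis with h5 | ⟨j, hjmem, hjval, hk⟩
            · have : (5 : Int) ≤ hop.length := by exact_mod_cast h5
              omega
            · have := hstep j hjmem hjval hk; omega
          have hm : (3 - (i + 1)).toNat < n := by clear hdis hdis' hstep hup'; omega
          have hlo' : -(hop.length : Int) ≤ i + 1 := by clear hdis hdis' hstep hup'; omega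
          have hup'' : i + 1 < hop.length := by exact_mod_cast hup'
          exact ih (3 - (i + 1)).toNat hm (i + 1) rfl (by clear hdis hdis' hstep; omega) hlo' hup'' hdis'
        · -- i = 2 with hop_ind[2] = 0: A takes the orbital tie-break; so does B on the empty rest
          have h5 : 5 ≤ hop.length := by
            rcases hdis with h5 | ⟨j, hjmem, hjval, _⟩
            · exact h5
            · have hjb := (PySem.List.mem_pyRange_one).1 hjmem
              have hj2 : j = i := by omega
              rw [hj2, hv] at hjval; simp [hv0] at hjval
          have h5' : (5 : Int) ≤ hop.length := by exact_mod_cast h5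
          obtain ⟨a, ha⟩ := pyGet?_isSome_of_bounds hop 3 (by omega) (by omega)
          obtain ⟨b, hb⟩ := pyGet?_isSome_of_bounds hop 4 (by omega) (by omega)
          rw [PySem.List.pyRange_one_eq_nil (by omega)]
          simp [altScanLoop, h1, h2, h3, ha, hb]

-- ===== VERDICT (by name: the statement is the Claim_ definition above) =====
theorem check_conj_spec : Claim_equal_check_conj := by
  intro hop_ind i _ hpre
  obtain ⟨hhi, hlo, hup, hdis⟩ := hpre
  unfold Spec_check_conj check_conj_alt
  exact scan_eq hop_ind (3 - i).toNat i rfl hhi hlo hup hdis
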